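-- pv_equiv track=rewrite | github.com/IulianMcn/SE-Provider | utils/dictionary_helper.py | aggregate_dicts
-- ===== SOURCE A (Python) =====
-- def aggregate_dicts(dicts):
--     aggregation = dict()
--
--     for idx, dict_to_aggregate in enumerate(dicts):
--         for key, value in dict_to_aggregate.items():
--             if key not in aggregation:
--                 aggregation[key] = [[] for i in range(len(dicts))]
--             aggregation[key][idx] = value
--
--     return aggregation
-- ===== SOURCE B (Python) =====
-- def aggregate_dicts(dicts):
--     # Simpler decomposition: collect the keys in first-encounter order (a dict used
--     # as an ordered set), then build each key's full row in one comprehension over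
--     # the dicts (a fresh [] per absent slot).
--     keys = {}
--     for d in dicts:
--         keys.update(d)
--     return {key: [d[key] if key in d else [] for d in dicts] for key in keys}
-- ===== Notes on version B (the rewrite author's own statement) =====
-- stated objective: simpler
-- what changed: A walks dict-by-dict, lazily creating a padded row per new key and overwriting one slot at a time; B first collects the keys in first-encounter order and then builds each key's whole row in a single comprehension over the dicts.
import Mathlib
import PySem

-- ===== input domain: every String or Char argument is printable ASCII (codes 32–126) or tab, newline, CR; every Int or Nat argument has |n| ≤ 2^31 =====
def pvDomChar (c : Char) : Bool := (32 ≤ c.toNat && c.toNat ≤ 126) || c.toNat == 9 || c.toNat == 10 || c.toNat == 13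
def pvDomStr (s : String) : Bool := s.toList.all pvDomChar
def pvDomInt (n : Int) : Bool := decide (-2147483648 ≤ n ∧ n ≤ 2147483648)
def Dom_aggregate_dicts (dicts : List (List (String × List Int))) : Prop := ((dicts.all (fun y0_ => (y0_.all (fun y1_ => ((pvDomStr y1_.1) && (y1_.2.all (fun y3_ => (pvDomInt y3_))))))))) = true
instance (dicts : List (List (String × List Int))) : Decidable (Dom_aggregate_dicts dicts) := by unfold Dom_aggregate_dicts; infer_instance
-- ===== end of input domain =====

-- B collects the keys first (first-encounter order) and then builds each key's whole
-- row in one pass over the dicts, instead of A's incremental slot-by-slot placement.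

-- ===== PORT A =====
def aggregate_dicts (dicts : List (List (String × List Int))) : List (String × List (List Int)) :=
  ((PySem.List.enumerate dicts).foldl
    (fun agg p =>
      p.2.foldl
        (fun agg kv =>
          (if agg.contains kv.1 then agg
           else agg.insert kv.1
             ((PySem.List.pyRange 0 (PySem.List.len dicts) 1).map (fun _ => ([] : List Int)))).modify
            kv.1 [] (fun row => PySem.List.pySetD row p.1 kv.2))
        agg)
    PySem.Dict.empty).items

-- ===== PORT B =====
def aggregate_dicts_alt (dicts : List (List (String × List Int))) : List (String × List (List Int)) :=
  ((dicts.foldl (fun ks d => PySem.Dict.update ks d)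
      (PySem.Dict.empty : PySem.Dict String (List Int))).keys).map
    (fun k => (k, dicts.map (fun d => (PySem.Dict.mk d).getD k [])))

-- ===== PRECONDITION & SPEC =====
-- Pre_ excludes association lists whose inner list repeats a key: a Python dict can
-- never carry duplicate keys, so such Lean inputs correspond to no Python input at all
-- (on them A's last-match overwrite and B's first-match lookup are both accidental).
def Pre_aggregate_dicts (dicts : List (List (String × List Int))) : Prop :=
  ∀ d ∈ dicts, (d.map Prod.fst).Nodup
instance (dicts : List (List (String × List Int))) : Decidable (Pre_aggregate_dicts dicts) := by
  unfold Pre_aggregate_dicts; infer_instance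
def pvWitness_aggregate_dicts : (List (List (String × List Int))) :=
  [[("a", [1, 2]), ("b", [])], [], [("b", [3])]]

def Spec_aggregate_dicts (dicts : List (List (String × List Int))) (out : List (String × List (List Int))) : Prop := out = aggregate_dicts_alt dicts
instance (dicts : List (List (String × List Int))) (out : List (String × List (List Int))) : Decidable (Spec_aggregate_dicts dicts out) := by unfold Spec_aggregate_dicts; infer_instance

-- ===== CLAIM (what is proved, stated in full; the proofs are below) =====
def Claim_equal_aggregate_dicts : Prop := ∀ (dicts : List (List (String × List Int))), Dom_aggregate_dicts dicts → Pre_aggregate_dicts dicts → Spec_aggregate_dicts dicts (aggregate_dicts dicts)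

-- ===== LEMMAS AND PROOFS =====
-- Proof-side names for A's loop pieces (n = len(dicts), i = the enumerate index).
def stepKV (n i : Int) (agg : PySem.Dict String (List (List Int))) (kv : String × List Int) :
    PySem.Dict String (List (List Int)) :=
  (if agg.contains kv.1 then agg
   else agg.insert kv.1 ((PySem.List.pyRange 0 n 1).map (fun _ => ([] : List Int)))).modify
    kv.1 [] (fun row => PySem.List.pySetD row i kv.2)

def blankRow (n : Int) : List (List Int) :=
  (PySem.List.pyRange 0 n 1).map (fun _ => ([] : List Int))

lemma contains_stepKV (n i : Int) (agg : PySem.Dict String (List (List Int)))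
    (kv : String × List Int) (k : String) :
    (stepKV n i agg kv).contains k = (k == kv.1 || agg.contains k) := by
  unfold stepKV
  split_ifs with h
  · rw [PySem.Dict.contains_modify]
  · rw [PySem.Dict.contains_modify, PySem.Dict.contains_insert]
    by_cases hk : k = kv.1 <;> simp [hk]

lemma getD_stepKV_ne (n i : Int) (agg : PySem.Dict String (List (List Int)))
    (kv : String × List Int) (k : String) (h : kv.1 ≠ k) :
    (stepKV n i agg kv).getD k [] = agg.getD k [] := by
  unfold stepKV
  split_ifs with hc
  · rw [PySem.Dict.getD_modify]; simp [Ne.symm h]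
  · rw [PySem.Dict.getD_modify]; simp [Ne.symm h, PySem.Dict.getD_insert]

lemma getD_stepKV_self (n i : Int) (agg : PySem.Dict String (List (List Int)))
    (kv : String × List Int) :
    (stepKV n i agg kv).getD kv.1 []
      = PySem.List.pySetD (if agg.contains kv.1 then agg.getD kv.1 [] else blankRow n) i kv.2 := by
  unfold stepKV
  split_ifs with hc
  · rw [PySem.Dict.getD_modify]; simp
  · rw [PySem.Dict.getD_modify, PySem.Dict.getD_insert]; simp [blankRow]

lemma keys_stepKV (n i : Int) (agg : PySem.Dict String (List (List Int)))
    (kv : String × List Int) :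
    (stepKV n i agg kv).keys = PySem.Set.add agg.keys kv.1 := by
  unfold stepKV
  rw [PySem.Set.add_eq_ite]
  split_ifs with hc hm hm
  · rw [PySem.Dict.keys_modify, PySem.Dict.keys_insert_of_contains _ _ hc]
  · exact absurd ((PySem.Dict.contains_iff_mem_keys _ _).mp hc) hm
  · exact absurd ((PySem.Dict.contains_iff_mem_keys _ _).mpr hm) (by simp [hc])
  · rw [PySem.Dict.keys_modify,
      PySem.Dict.keys_insert_of_contains _ _ (PySem.Dict.contains_insert_self _ _ _),
      PySem.Dict.keys_insert_of_not_contains _ _ (by simp [hc])]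

def innerF (n i : Int) (agg : PySem.Dict String (List (List Int)))
    (d : List (String × List Int)) : PySem.Dict String (List (List Int)) :=
  d.foldl (stepKV n i) agg

def outerF (n : Int) (agg : PySem.Dict String (List (List Int)))
    (ps : List (Int × List (String × List Int))) : PySem.Dict String (List (List Int)) :=
  ps.foldl (fun agg p => innerF n p.1 agg p.2) agg

lemma keys_innerF (n i : Int) (agg : PySem.Dict String (List (List Int)))
    (d : List (String × List Int)) :
    (innerF n i agg d).keys = PySem.Set.update agg.keys (d.map Prod.fst) := by
  rw [PySem.Set.update_map_eq_foldl_add]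
  induction d generalizing agg with
  | nil => rfl
  | cons kv rest ih => simp only [innerF, List.foldl_cons] at *; rw [ih, keys_stepKV]

lemma keys_outerF (n : Int) (agg : PySem.Dict String (List (List Int)))
    (ps : List (Int × List (String × List Int))) :
    (outerF n agg ps).keys = PySem.Set.update agg.keys (ps.flatMap (fun p => p.2.map Prod.fst)) := by
  induction ps generalizing agg with
  | nil => rfl
  | cons p rest ih =>
      simp only [outerF, List.foldl_cons, List.flatMap_cons] at *
      rw [ih, keys_innerF, PySem.Set.update_append]

lemma innerF_untouched (n i : Int) (k : String) (d : List (String × List Int))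
    (agg : PySem.Dict String (List (List Int))) (h : ∀ kv ∈ d, kv.1 ≠ k) :
    (innerF n i agg d).getD k [] = agg.getD k [] := by
  induction d generalizing agg with
  | nil => rfl
  | cons kv rest ih =>
      simp only [innerF, List.foldl_cons] at *
      rw [ih _ (fun x hx => h x (by simp [hx])), getD_stepKV_ne _ _ _ _ _ (h kv (by simp))]

lemma contains_innerF (n i : Int) (k : String) (d : List (String × List Int))
    (agg : PySem.Dict String (List (List Int))) :
    (innerF n i agg d).contains k = (agg.contains k || decide (k ∈ d.map Prod.fst)) := by
  induction d generalizing agg with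
  | nil => simp [innerF]
  | cons kv rest ih =>
      simp only [innerF, List.foldl_cons] at *
      rw [ih, contains_stepKV]
      by_cases hk : k = kv.1
      · simp [hk]
      · have h1 : (k == kv.1) = false := by simp [hk]
        have h2 : decide (k ∈ List.map Prod.fst (kv :: rest)) = decide (k ∈ List.map Prod.fst rest) := by
          simp [List.mem_cons, hk]
        rw [h1, h2, Bool.false_or]

lemma mk_get?_eq_none_iff (k : String) (d : List (String × List Int)) :
    (PySem.Dict.mk d).get? k = none ↔ k ∉ d.map Prod.fst := by
  induction d with
  | nil => simp [PySem.Dict.get?]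
  | cons kv rest ih =>
      rw [show (PySem.Dict.mk (kv :: rest)) = { items := kv :: rest } from rfl]
      cases kv with | mk k0 v0 =>
      rw [PySem.Dict.get?_mk_cons]
      by_cases hk : k0 = k
      · simp [hk]
      · simp only [List.mem_map, List.mem_cons] at *
        simp [hk, ih]

lemma getD_innerF (n i : Int) (k : String) (d : List (String × List Int))
    (hnd : (d.map Prod.fst).Nodup) (agg : PySem.Dict String (List (List Int))) :
    (innerF n i agg d).getD k []
      = match (PySem.Dict.mk d).get? k with
        | some v => PySem.List.pySetD (if agg.contains k then agg.getD k [] else blankRow n) i v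
        | none => agg.getD k [] := by
  induction d generalizing agg with
  | nil =>
      have : (PySem.Dict.mk ([] : List (String × List Int))).get? k = none := by
        simp [PySem.Dict.get?]
      rw [this]
      simp [innerF]
  | cons kv rest ih =>
      simp only [List.map_cons, List.nodup_cons] at hnd
      cases kv with | mk k0 v0 =>
      rw [show (PySem.Dict.mk ((k0, v0) :: rest)) = { items := (k0, v0) :: rest } from rfl,
        PySem.Dict.get?_mk_cons]
      simp only [innerF, List.foldl_cons] at *
      by_cases hk : k0 = k
      · subst hk
        rw [show List.foldl (stepKV n i) (stepKV n i agg (k0, v0)) rest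
            = innerF n i (stepKV n i agg (k0, v0)) rest from rfl]
        rw [innerF_untouched n i k0 rest _
            (fun x hx h => hnd.1 (by simpa [h] using List.mem_map_of_mem (f := Prod.fst) hx)),
          getD_stepKV_self n i agg (k0, v0)]
        simp
      · have h1 : (k0 == k) = false := by simp [hk]
        rw [h1]
        simp only [Bool.false_eq_true, if_false]
        rw [ih hnd.2]
        have hc : (stepKV n i agg (k0, v0)).contains k = agg.contains k := by
          rw [contains_stepKV]; simp [Ne.symm hk]
        have hg : (stepKV n i agg (k0, v0)).getD k [] = agg.getD k [] :=
          getD_stepKV_ne n i agg (k0, v0) k hk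
        rw [hc, hg]

def appRow (k : String) (row : List (List Int)) (i : Int)
    (ds : List (List (String × List Int))) : List (List Int) :=
  match ds with
  | [] => row
  | d :: rest =>
      appRow k
        (match (PySem.Dict.mk d).get? k with
         | some v => PySem.List.pySetD row i v
         | none => row) (i + 1) rest

lemma getD_outerF (n : Int) (k : String) (ds : List (List (String × List Int)))
    (hpre : ∀ d ∈ ds, (d.map Prod.fst).Nodup) :
    ∀ (i : Int) (agg : PySem.Dict String (List (List Int))),
    (outerF n agg (PySem.List.enumerate ds i)).getD k []
      = if agg.contains k then appRow k (agg.getD k []) i ds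
        else if k ∈ ds.flatMap (fun d => d.map Prod.fst) then appRow k (blankRow n) i ds
        else agg.getD k [] := by
  induction ds with
  | nil => intro i agg; simp [outerF, PySem.List.enumerate, appRow]
  | cons d rest ih =>
      intro i agg
      have hd : (d.map Prod.fst).Nodup := hpre d (by simp)
      have hrest : ∀ d' ∈ rest, (d'.map Prod.fst).Nodup := fun d' h => hpre d' (by simp [h])
      rw [PySem.List.enumerate_cons]
      have houter : outerF n agg ((i, d) :: PySem.List.enumerate rest (i + 1))
          = outerF n (innerF n i agg d) (PySem.List.enumerate rest (i + 1)) := rfl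
      rw [houter, ih hrest]
      have hcontains := contains_innerF n i k d agg
      have hgetD := getD_innerF n i k d hd agg
      rcases hg : (PySem.Dict.mk d).get? k with _ | v
      · -- k not in d
        have hkd : k ∉ d.map Prod.fst := (mk_get?_eq_none_iff k d).mp hg
        rw [hg] at hgetD
        rw [hcontains, hgetD]
        have : decide (k ∈ List.map Prod.fst d) = false := by simp [hkd]
        rw [this, Bool.or_false]
        by_cases hc : agg.contains k
        · simp only [hc, if_true, appRow, hg]
        · simp only [hc, Bool.false_eq_true, if_false]
          have hflat : (k ∈ (d :: rest).flatMap fun d => List.map Prod.fst d)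
              ↔ (k ∈ rest.flatMap fun d => List.map Prod.fst d) := by
            simp [List.flatMap_cons, hkd]
          by_cases hm : k ∈ rest.flatMap fun d => List.map Prod.fst d
          · simp only [hm, if_true, hflat.mpr hm, appRow, hg]
          · simp only [hm, if_false, hflat]
      · -- k in d with value v
        have hkd : k ∈ d.map Prod.fst := by
          by_contra h
          rw [(mk_get?_eq_none_iff k d).mpr h] at hg; cases hg
        rw [hg] at hgetD
        rw [hcontains, hgetD]
        have h1 : decide (k ∈ List.map Prod.fst d) = true := by simp [hkd]
        rw [h1, Bool.or_true]
        have hflat : k ∈ (d :: rest).flatMap fun d => List.map Prod.fst d := by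
          simp [List.flatMap_cons, hkd]
        simp only [if_true, hflat, appRow, hg]
        by_cases hc : agg.contains k
        · simp [hc]
        · simp [hc]

lemma set_take_self (l : List (List Int)) (i : Nat) (v : List Int) :
    (l.set i v).take i = l.take i := by
  rw [List.take_set]
  exact List.set_eq_of_length_le (by simp)

lemma drop_succ_of_drop (row : List (List Int)) (i m : Nat)
    (h : row.drop i = List.replicate (m + 1) []) :
    row.drop (i + 1) = List.replicate m [] := by
  have := congrArg (List.drop 1) h
  rwa [List.drop_drop, List.replicate_succ, List.drop_one, List.tail_cons] at this

lemma appRow_spec (k : String) :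
    ∀ (ds : List (List (String × List Int))) (i : Nat) (row : List (List Int)),
      row.length = i + ds.length → row.drop i = List.replicate ds.length [] →
      appRow k row (i : Int) ds
        = row.take i ++ ds.map (fun d => (PySem.Dict.mk d).getD k []) := by
  intro ds
  induction ds with
  | nil =>
      intro i row hlen _
      simp only [List.length_nil] at hlen
      simp only [appRow, List.map_nil, List.append_nil]
      exact (List.take_of_length_le (by omega)).symm
  | cons d rest ih =>
      intro i row hlen hdrop
      simp only [List.length_cons] at hlen hdrop
      have hi : row[i]? = some [] := by
        have h0 : (row.drop i)[0]? = some [] := by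
          rw [hdrop]; simp
        rwa [List.getElem?_drop, Nat.add_zero] at h0
      have hdrop' := drop_succ_of_drop row i rest.length hdrop
      have hcast : ((i : Int) + 1) = ((i + 1 : Nat) : Int) := by push_cast; ring
      simp only [appRow, List.map_cons]
      rcases hg : (PySem.Dict.mk d).get? k with _ | v
      · have hm : (match (none : Option (List Int)) with
            | some v => PySem.List.pySetD row (i : Int) v
            | none => row) = row := rfl
        rw [hm]
        have hD : (PySem.Dict.mk d).getD k [] = [] := by
          rw [PySem.Dict.getD_eq_get?_getD, hg]; rfl
        rw [hcast, ih (i + 1) row (by omega) hdrop', hD, List.take_add_one, hi]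
        simp
      · have hm : (match (some v : Option (List Int)) with
            | some v => PySem.List.pySetD row (i : Int) v
            | none => row) = row.set i v := PySem.List.pySetD_natCast row i v
        rw [hm]
        have hD : (PySem.Dict.mk d).getD k [] = v := by
          rw [PySem.Dict.getD_eq_get?_getD, hg]; rfl
        rw [hcast, ih (i + 1) (row.set i v) (by simp [List.length_set]; omega)
          (by rw [List.drop_set]; simp only [Nat.lt_succ_self, if_true]; exact hdrop')]
        rw [hD, List.take_add_one]
        have hlt : i < row.length := by omega
        rw [List.getElem?_set_self hlt, set_take_self]
        simp

lemma blankRow_eq (n : Nat) : blankRow (n : Int) = List.replicate n [] := by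
  rw [List.eq_replicate_iff]
  constructor
  · simp [blankRow, PySem.List.length_pyRange_one]
  · intro b hb
    simp only [blankRow, List.mem_map] at hb
    obtain ⟨_, _, h⟩ := hb
    exact h.symm

lemma portA_eq (dicts : List (List (String × List Int))) :
    aggregate_dicts dicts
      = (outerF (PySem.List.len dicts) PySem.Dict.empty (PySem.List.enumerate dicts)).items := rfl

lemma keysAcc_eq (dicts : List (List (String × List Int))) :
    ∀ ks : PySem.Dict String (List Int),
    (dicts.foldl (fun ks d => PySem.Dict.update ks d) ks).keys
      = PySem.Set.update ks.keys (dicts.flatMap (fun d => d.map Prod.fst)) := by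
  induction dicts with
  | nil => intro ks; rfl
  | cons d rest ih =>
      intro ks
      rw [List.foldl_cons, List.flatMap_cons, PySem.Set.update_append, ih]
      congr 1
      exact PySem.Dict.keys_foldl_insert_key d Prod.fst (fun _ p => p.2) ks

lemma aggregate_dicts_eq (dicts : List (List (String × List Int)))
    (hpre : ∀ d ∈ dicts, (d.map Prod.fst).Nodup) :
    aggregate_dicts dicts = aggregate_dicts_alt dicts := by
  rw [portA_eq]
  set n := PySem.List.len dicts with hn
  set F := outerF n PySem.Dict.empty (PySem.List.enumerate dicts) with hF
  have hkeys : F.keys = PySem.Set.ofList (dicts.flatMap (fun d => d.map Prod.fst)) := by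
    rw [hF, keys_outerF, PySem.Dict.keys_empty, PySem.Set.update_nil_left]
    congr 1
    conv_rhs => rw [← PySem.List.map_snd_enumerate dicts 0, List.flatMap_map]
  have hnodup : F.keys.Nodup := by rw [hkeys]; exact PySem.Set.nodup_ofList _
  rw [PySem.Dict.items_eq_map_keys F hnodup []]
  unfold aggregate_dicts_alt
  rw [keysAcc_eq dicts PySem.Dict.empty, PySem.Dict.keys_empty, PySem.Set.update_nil_left,
    ← hkeys]
  apply List.map_congr_left
  intro k hk
  have hkmem : k ∈ dicts.flatMap (fun d => d.map Prod.fst) := by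
    rw [hkeys] at hk; exact (PySem.Set.mem_ofList _ _).mp hk
  have h1 : F.getD k [] = appRow k (blankRow n) 0 dicts := by
    rw [hF, getD_outerF n k dicts hpre 0 PySem.Dict.empty]
    simp [PySem.Dict.contains_empty, hkmem]
  have h2 : appRow k (blankRow n) 0 dicts
      = dicts.map (fun d => (PySem.Dict.mk d).getD k []) := by
    have := appRow_spec k dicts 0 (blankRow n)
      (by rw [hn, PySem.List.len_eq, blankRow_eq]; simp)
      (by rw [hn, PySem.List.len_eq, blankRow_eq]; simp)
    simpa using this
  rw [h1, h2]

-- ===== VERDICT (by name: the statement is the Claim_ definition above) =====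
theorem aggregate_dicts_spec : Claim_equal_aggregate_dicts := by
  intro dicts _ hpre
  unfold Spec_aggregate_dicts
  exact aggregate_dicts_eq dicts hpre
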